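-- pv_equiv track=rewrite | github.com/stefanwebb/coding-challenge-preparation | coderbyte/easy/array-addition.py | ArrayAdditionI
-- ===== SOURCE A (Python) =====
-- def ArrayAdditionI(arr):
--     # Find the largest element and remove
--     maxElem = max(arr)
--     arr = [e for e in arr if e != maxElem]
--
--     # Call helper method
--     def recurseAdd(currentSum, currentArr, maxElem):
--         for i in range(len(currentArr)):
--             thisSum = currentSum + currentArr[i]
--             if thisSum == maxElem:
--                 return True
--
--             elif i != len(currentArr)-1:
--                 if recurseAdd(thisSum, currentArr[(i+1):], maxElem) == True:
--                     return True
--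
--         # code goes here
--         return False
--
--     if recurseAdd(0, arr, maxElem):
--         return "true"
--     else:
--         return "false"
-- ===== SOURCE B (Python) =====
-- def ArrayAdditionI(arr):
--     # Subset-sum DP: maintain the set of sums of nonempty subsets of the
--     # non-max elements seen so far; answer is whether the max is reachable.
--     maxElem = max(arr)
--     sums = set()
--     for e in arr:
--         if e != maxElem:
--             sums |= {s + e for s in sums} | {e}
--     return "true" if maxElem in sums else "false"
-- ===== Notes on version B (the rewrite author's own statement) =====
-- stated objective: alternative
-- what changed: Replaces A's recursion enumerating every nonempty subset of the non-max elements by a single left-to-right pass maintaining the set of reachable nonempty-subset sums and testing membership of the max.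
import Mathlib
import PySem

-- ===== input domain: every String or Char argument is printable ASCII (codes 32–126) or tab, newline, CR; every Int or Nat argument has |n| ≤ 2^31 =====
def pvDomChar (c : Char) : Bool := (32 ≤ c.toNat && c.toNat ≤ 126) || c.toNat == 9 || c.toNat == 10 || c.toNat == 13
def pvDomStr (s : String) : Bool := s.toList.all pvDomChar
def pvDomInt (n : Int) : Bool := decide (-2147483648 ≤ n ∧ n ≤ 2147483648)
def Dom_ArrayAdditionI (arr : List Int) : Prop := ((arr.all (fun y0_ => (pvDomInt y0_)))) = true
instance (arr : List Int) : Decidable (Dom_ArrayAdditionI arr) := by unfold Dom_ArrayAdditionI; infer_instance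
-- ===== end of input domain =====

-- B replaces A's recursion over all subsets by a one-pass subset-sum
-- DP over the set of reachable nonempty-subset sums (objective: alternative).
-- Pre_ excludes the empty list, on which Python's max([]) raises ValueError.

-- ===== PORT A =====
def recurseAdd (currentSum : Int) (currentArr : List Int) (maxElem : Int) : Bool :=
  match currentArr with
  | [] => false                                   -- loop over an empty range: return False
  | x :: rest =>
    let thisSum := currentSum + x
    if thisSum = maxElem then true
    else if rest ≠ [] then                        -- i != len(currentArr)-1
      if recurseAdd thisSum rest maxElem then true
      else recurseAdd currentSum rest maxElem     -- continue the loop at i+1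
    else false                                    -- last iteration, loop ends

def ArrayAdditionI (arr : List Int) : String :=
  match PySem.List.max? arr (fun x => x) with
  | none => ""                                    -- max([]) raises; excluded by Pre_
  | some maxElem =>
    let arr2 := arr.filter (fun e => decide (e ≠ maxElem))
    if recurseAdd 0 arr2 maxElem then "true" else "false"

-- ===== PORT B =====
def bStep (maxElem : Int) (sums : PySem.Set Int) (e : Int) : PySem.Set Int :=
  if e ≠ maxElem then
    PySem.Set.union sums
      (PySem.Set.union (PySem.Set.ofList (sums.map (fun s => s + e))) [e])
  else sums

def ArrayAdditionI_alt (arr : List Int) : String :=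
  match PySem.List.max? arr (fun x => x) with
  | none => ""                                    -- max([]) raises; excluded by Pre_
  | some maxElem =>
    let sums := arr.foldl (bStep maxElem) PySem.Set.empty
    if PySem.Set.contains sums maxElem then "true" else "false"

-- ===== PRECONDITION & SPEC =====
-- Pre_ excludes exactly the empty list: max([]) raises ValueError in A (and in B).
def Pre_ArrayAdditionI (arr : List Int) : Prop := arr ≠ []
instance (arr : List Int) : Decidable (Pre_ArrayAdditionI arr) := by unfold Pre_ArrayAdditionI; infer_instance
def pvWitness_ArrayAdditionI : List Int := [4, 6, 23, 10, 1, 3]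
def Spec_ArrayAdditionI (arr : List Int) (out : String) : Prop := out = ArrayAdditionI_alt arr
instance (arr : List Int) (out : String) : Decidable (Spec_ArrayAdditionI arr out) := by unfold Spec_ArrayAdditionI; infer_instance

-- ===== CLAIM (what is proved, stated in full; the proofs are below) =====
def Claim_equal_ArrayAdditionI : Prop := ∀ (arr : List Int), Dom_ArrayAdditionI arr → Pre_ArrayAdditionI arr → Spec_ArrayAdditionI arr (ArrayAdditionI arr)

-- ===== LEMMAS AND PROOFS =====

-- A's recursion finds exactly the sums of nonempty sublists, offset by currentSum.
theorem recurseAdd_iff (l : List Int) : ∀ (s m : Int),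
    recurseAdd s l m = true ↔ ∃ sub, sub.Sublist l ∧ sub ≠ [] ∧ s + sub.sum = m := by
  induction l with
  | nil => intro s m; simp [recurseAdd]
  | cons x rest ih =>
    intro s m
    have key : recurseAdd s (x :: rest) m
        = (decide (s + x = m) || recurseAdd (s + x) rest m || recurseAdd s rest m) := by
      cases rest with
      | nil => simp [recurseAdd]
      | cons a t =>
        show (if s + x = m then true else if (a :: t) ≠ [] then _ else false) = _
        by_cases h : s + x = m <;> simp [h]
    rw [key]
    simp only [Bool.or_eq_true, decide_eq_true_eq, ih]
    constructor
    · rintro ((h | ⟨sub, h1, h2, h3⟩) | ⟨sub, h1, h2, h3⟩)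
      · exact ⟨[x], by simp, by simp, by simpa using h⟩
      · exact ⟨x :: sub, List.Sublist.cons₂ x h1, by simp, by simp; omega⟩
      · exact ⟨sub, h1.cons x, h2, h3⟩
    · rintro ⟨sub, h1, h2, h3⟩
      rcases List.sublist_cons_iff.mp h1 with h | ⟨r, rfl, hr⟩
      · exact Or.inr ⟨sub, h, h2, h3⟩
      · cases r with
        | nil => left; left; simpa using h3
        | cons b t =>
          left; right
          exact ⟨b :: t, hr, by simp, by simp at h3 ⊢; omega⟩

-- B's fold accumulates exactly the sums of nonempty sublists of the filtered list,
-- on top of offsets taken from the incoming set.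
theorem mem_foldl_bStep (l : List Int) : ∀ (S : PySem.Set Int) (m y : Int),
    y ∈ l.foldl (bStep m) S ↔
      y ∈ S ∨ ∃ sub, sub.Sublist (l.filter (fun e => decide (e ≠ m))) ∧ sub ≠ [] ∧
        (sub.sum = y ∨ ∃ s ∈ S, s + sub.sum = y) := by
  induction l with
  | nil => intro S m y; simp
  | cons e rest ih =>
    intro S m y
    by_cases he : e = m
    · simp only [List.foldl_cons, List.filter_cons, he]
      simp only [bStep]
      simp [ih]
    · have hS' : ∀ z, z ∈ bStep m S e ↔ z ∈ S ∨ (∃ s ∈ S, s + e = z) ∨ z = e := by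
        intro z
        simp [bStep, he, PySem.Set.mem_union, PySem.Set.mem_ofList]
      simp only [List.foldl_cons, List.filter_cons, decide_eq_true_eq]
      rw [if_pos he]
      rw [ih]
      constructor
      · rintro (hz | ⟨sub, h1, h2, (h3 | ⟨s, hs, h4⟩)⟩)
        · rcases (hS' y).mp hz with h | ⟨s, hs, h⟩ | h
          · exact Or.inl h
          · exact Or.inr ⟨[e], by simp, by simp, Or.inr ⟨s, hs, by simpa using h⟩⟩
          · exact Or.inr ⟨[e], by simp, by simp, Or.inl (by simpa using h.symm)⟩
        · exact Or.inr ⟨sub, h1.cons e, h2, Or.inl h3⟩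
        · rcases (hS' s).mp hs with h | ⟨s0, hs0, h⟩ | h
          · exact Or.inr ⟨sub, h1.cons e, h2, Or.inr ⟨s, h, h4⟩⟩
          · exact Or.inr ⟨e :: sub, List.Sublist.cons₂ e h1, by simp,
              Or.inr ⟨s0, hs0, by simp; omega⟩⟩
          · exact Or.inr ⟨e :: sub, List.Sublist.cons₂ e h1, by simp,
              Or.inl (by simp; omega)⟩
      · rintro (hz | ⟨sub, h1, h2, hcase⟩)
        · exact Or.inl ((hS' y).mpr (Or.inl hz))
        · rcases List.sublist_cons_iff.mp h1 with h | ⟨r, rfl, hr⟩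
          · refine Or.inr ⟨sub, h, h2, ?_⟩
            rcases hcase with h3 | ⟨s, hs, h4⟩
            · exact Or.inl h3
            · exact Or.inr ⟨s, (hS' s).mpr (Or.inl hs), h4⟩
          · cases r with
            | nil =>
              rcases hcase with h3 | ⟨s, hs, h4⟩
              · exact Or.inl ((hS' y).mpr (Or.inr (Or.inr (by simpa using h3.symm))))
              · exact Or.inl ((hS' y).mpr (Or.inr (Or.inl ⟨s, hs, by simpa using h4⟩)))
            | cons b t =>
              rcases hcase with h3 | ⟨s, hs, h4⟩
              · refine Or.inr ⟨b :: t, hr, by simp, Or.inr ⟨e, (hS' e).mpr (Or.inr (Or.inr rfl)), ?_⟩⟩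
                simp at h3 ⊢; omega
              · refine Or.inr ⟨b :: t, hr, by simp, Or.inr ⟨s + e, (hS' (s+e)).mpr (Or.inr (Or.inl ⟨s, hs, rfl⟩)), ?_⟩⟩
                simp at h4 ⊢; omega

-- ===== VERDICT (by name: the statement is the Claim_ definition above) =====
theorem ArrayAdditionI_spec : Claim_equal_ArrayAdditionI := by
  intro arr _ hpre
  unfold Spec_ArrayAdditionI ArrayAdditionI ArrayAdditionI_alt
  cases hmax : PySem.List.max? arr (fun x => x) with
  | none => exact absurd ((PySem.List.max?_eq_none_iff arr _).mp hmax) hpre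
  | some m =>
    simp only
    have hA := recurseAdd_iff (arr.filter (fun e => decide (e ≠ m))) 0 m
    have hB := mem_foldl_bStep arr PySem.Set.empty m m
    by_cases h : ∃ sub, sub.Sublist (arr.filter (fun e => decide (e ≠ m))) ∧ sub ≠ [] ∧ sub.sum = m
    · rw [if_pos, if_pos]
      · rw [PySem.Set.contains_iff, hB]
        obtain ⟨sub, h1, h2, h3⟩ := h
        exact Or.inr ⟨sub, h1, h2, Or.inl h3⟩
      · rw [hA]
        obtain ⟨sub, h1, h2, h3⟩ := h
        exact ⟨sub, h1, h2, by omega⟩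
    · rw [if_neg, if_neg]
      · rw [Bool.not_eq_true, ← Bool.not_eq_true, PySem.Set.contains_iff, hB]
        rintro (hc | ⟨sub, h1, h2, (h3 | ⟨s, hs, _⟩)⟩)
        · simp [PySem.Set.empty] at hc
        · exact h ⟨sub, h1, h2, h3⟩
        · simp [PySem.Set.empty] at hs
      · rw [Bool.not_eq_true, ← Bool.not_eq_true, hA]
        rintro ⟨sub, h1, h2, h3⟩
        exact h ⟨sub, h1, h2, by omega⟩
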